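-- pv_equiv track=rewrite | github.com/pqnguyen/CompetitiveProgramming | interviewbit/ValidNumber.py | isNumberHelper
-- ===== SOURCE A (Python) =====
-- def isNumberHelper(A, start, end, allowDot=True):
--     if start <= end and A[start] == '+' or A[start] == '-': start += 1
--     if A[end] == '.': return 0
--     if start > end: return 0
--     dot = 0
--     for i in range(start, end + 1):
--         if A[i] == '.' and allowDot:
--             if not dot:
--                 dot = 1
--             else:
--                 return 0
--         elif not A[i].isnumeric():
--             return 0
--     return 1
-- ===== SOURCE B (Python) =====
-- # B: replaces A's stateful char loop by slice-gather, one replace('.','',1) and a whole-string isdigit check.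
-- def isNumberHelper(A, start, end, allowDot=True):
--     skip = 1 if ((start <= end and A[start] == '+') or A[start] == '-') else 0
--     lo = start + skip
--     if A[end] == '.' or lo > end:
--         return 0
--     s = ''.join(A[i] for i in range(lo, end + 1))
--     body = s.replace('.', '', 1) if allowDot else s
--     return int(body.isdigit())
-- ===== Notes on version B (the rewrite author's own statement) =====
-- stated objective: simpler
-- what changed: A's single stateful char-by-char loop (dot flag, three early returns) is replaced by gathering the indexed slice and validating it whole: remove at most one '.' with replace('.','',1) when dots are allowed, then a single str.isdigit() pass.
import Mathlib
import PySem

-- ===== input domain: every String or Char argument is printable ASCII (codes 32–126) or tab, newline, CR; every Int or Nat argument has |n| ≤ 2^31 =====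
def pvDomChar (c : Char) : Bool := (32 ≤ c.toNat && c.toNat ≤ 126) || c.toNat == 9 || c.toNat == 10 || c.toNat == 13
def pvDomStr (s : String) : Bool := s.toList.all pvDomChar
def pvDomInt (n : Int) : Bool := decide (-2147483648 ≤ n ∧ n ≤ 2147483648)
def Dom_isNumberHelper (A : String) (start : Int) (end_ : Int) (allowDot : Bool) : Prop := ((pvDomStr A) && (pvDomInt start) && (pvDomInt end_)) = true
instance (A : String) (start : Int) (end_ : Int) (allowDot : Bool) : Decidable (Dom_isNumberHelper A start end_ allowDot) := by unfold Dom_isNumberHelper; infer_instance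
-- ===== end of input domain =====

-- B keeps A's semantics but swaps A's single stateful char scan for gather-slice + remove-one-dot + one whole-string digit check (simpler decomposition, same cost).


-- ===== PORT A =====
-- A's `for i in range(start, end+1)` with the mutable `dot` flag and early returns.
-- `.isnumeric()` is ported as PySem.Chars.isdigit: exact on the ASCII Dom.
def isNumLoop (A : String) (allowDot : Bool) : List Int → Int → Int
  | [], _ => 1
  | i :: rest, dot =>
    match PySem.Str.pyGet? A i with
    | none => 0  -- IndexError (excluded by Pre_)
    | some c =>
      if c == '.' && allowDot then
        if dot == 0 then isNumLoop A allowDot rest 1 else 0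
      else if !(PySem.Chars.isdigit c) then 0
      else isNumLoop A allowDot rest dot

def isNumberHelper (A : String) (start : Int) (end_ : Int) (allowDot : Bool) : Int :=
  match PySem.Str.pyGet? A start with
  | none => 0  -- Python raises IndexError here (excluded by Pre_)
  | some c0 =>
    -- Python's `start <= end and A[start] == '+' or A[start] == '-'` (and-binds-tighter quirk kept)
    let start' := if (decide (start ≤ end_) && (c0 == '+')) || (c0 == '-') then start + 1 else start
    match PySem.Str.pyGet? A end_ with
    | none => 0  -- IndexError (excluded by Pre_)
    | some ce =>
      if ce == '.' then 0
      else if decide (start' > end_) then 0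
      else isNumLoop A allowDot (PySem.List.pyRange start' (end_ + 1) 1) 0

-- ===== PORT B =====
-- `''.join(A[i] for i in range(lo, end+1))`; none = an IndexError in the generator.
def gatherChars (A : String) : List Int → Option (List Char)
  | [] => some []
  | i :: rest =>
    match PySem.Str.pyGet? A i with
    | none => none
    | some c => (gatherChars A rest).map (fun cs => c :: cs)

def isNumberHelper_alt (A : String) (start : Int) (end_ : Int) (allowDot : Bool) : Int :=
  match PySem.Str.pyGet? A start, PySem.Str.pyGet? A end_ with
  | none, _ => 0  -- IndexError (excluded by Pre_)
  | _, none => 0  -- IndexError (excluded by Pre_)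
  | some c0, some ce =>
    let skip : Int := if (decide (start ≤ end_) && (c0 == '+')) || (c0 == '-') then 1 else 0
    let lo := start + skip
    if ce == '.' || decide (lo > end_) then 0
    else
      match gatherChars A (PySem.List.pyRange lo (end_ + 1) 1) with
      | none => 0
      | some s =>
        -- s.replace('.','',1) = remove the first '.' = List.erase s '.'
        let body := if allowDot then s.erase '.' else s
        if PySem.Chars.strIsdigit body then 1 else 0

-- ===== PRECONDITION & SPEC =====
-- Pre_ excludes exactly the inputs where Python A raises IndexError: A[start] is always
-- evaluated (by the `or` branch) and A[end] right after, so both indices must be in range;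
-- every loop index then lies in range as well.
def Pre_isNumberHelper (A : String) (start : Int) (end_ : Int) (allowDot : Bool) : Prop :=
  PySem.Raise.InRange (PySem.Str.len A).toNat start ∧ PySem.Raise.InRange (PySem.Str.len A).toNat end_
instance (A : String) (start : Int) (end_ : Int) (allowDot : Bool) : Decidable (Pre_isNumberHelper A start end_ allowDot) := by unfold Pre_isNumberHelper; infer_instance

def pvWitness_isNumberHelper : String × Int × Int × Bool := ("12.3", 0, 3, true)

def Spec_isNumberHelper (A : String) (start : Int) (end_ : Int) (allowDot : Bool) (out : Int) : Prop := out = isNumberHelper_alt A start end_ allowDot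
instance (A : String) (start : Int) (end_ : Int) (allowDot : Bool) (out : Int) : Decidable (Spec_isNumberHelper A start end_ allowDot out) := by unfold Spec_isNumberHelper; infer_instance

-- ===== CLAIM (what is proved, stated in full; the proofs are below) =====
def Claim_equal_isNumberHelper : Prop := ∀ (A : String) (start : Int) (end_ : Int) (allowDot : Bool), Dom_isNumberHelper A start end_ allowDot → Pre_isNumberHelper A start end_ allowDot → Spec_isNumberHelper A start end_ allowDot (isNumberHelper A start end_ allowDot)

-- ===== LEMMAS AND PROOFS =====

-- A's loop as a pure scan over the already-gathered characters.
def scanChars (allowDot : Bool) : Int → List Char → Int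
  | _, [] => 1
  | dot, c :: rest =>
    if c == '.' && allowDot then
      if dot == 0 then scanChars allowDot 1 rest else 0
    else if !(PySem.Chars.isdigit c) then 0
    else scanChars allowDot dot rest

theorem loop_none (A : String) (allowDot : Bool) :
    ∀ (idxs : List Int) (dot : Int), gatherChars A idxs = none →
      isNumLoop A allowDot idxs dot = 0 := by
  intro idxs
  induction idxs with
  | nil => intro dot h; simp [gatherChars] at h
  | cons i rest ih =>
    intro dot h
    simp only [gatherChars, isNumLoop] at *
    cases hg : PySem.Str.pyGet? A i with
    | none => simp
    | some c =>
      rw [hg] at h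
      simp only [Option.map_eq_none_iff] at h
      by_cases h1 : (c == '.' && allowDot) = true
      · simp only [h1, if_pos]
        by_cases h2 : dot = 0
        · simp [h2, ih _ h]
        · simp [h2]
      · simp only [Bool.not_eq_true] at h1
        by_cases h3 : PySem.Chars.isdigit c = true
        · simp [h1, h3, ih _ h]
        · simp [h1, h3]

theorem loop_some (A : String) (allowDot : Bool) :
    ∀ (idxs : List Int) (cs : List Char) (dot : Int), gatherChars A idxs = some cs →
      isNumLoop A allowDot idxs dot = scanChars allowDot dot cs := by
  intro idxs
  induction idxs with
  | nil =>
    intro cs dot h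
    simp only [gatherChars, Option.some.injEq] at h
    subst h; rfl
  | cons i rest ih =>
    intro cs dot h
    simp only [gatherChars] at h
    cases hg : PySem.Str.pyGet? A i with
    | none => rw [hg] at h; simp at h
    | some c =>
      rw [hg] at h
      cases hr : gatherChars A rest with
      | none => rw [hr] at h; simp at h
      | some cs' =>
        rw [hr] at h
        simp only [Option.map_some, Option.some.injEq] at h
        subst h
        simp only [isNumLoop, hg, scanChars]
        by_cases h1 : (c == '.' && allowDot) = true
        · simp only [h1, if_pos]
          by_cases h2 : dot = 0
          · simp [h2, ih _ _ hr]
          · simp [h2]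
        · simp only [Bool.not_eq_true] at h1
          by_cases h3 : PySem.Chars.isdigit c = true
          · simp [h1, h3, ih _ _ hr]
          · simp [h1, h3]

theorem gather_append (A : String) :
    ∀ (l : List Int) (i : Int), gatherChars A (l ++ [i]) =
      (gatherChars A l).bind (fun cs => (PySem.Str.pyGet? A i).map (fun c => cs ++ [c])) := by
  intro l i
  induction l with
  | nil =>
    simp only [List.nil_append, gatherChars]
    cases PySem.Str.pyGet? A i <;> simp
  | cons j rest ih =>
    simp only [List.cons_append, gatherChars, ih]
    cases PySem.Str.pyGet? A j with
    | none => simp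
    | some c =>
      cases gatherChars A rest with
      | none => simp
      | some cs => cases PySem.Str.pyGet? A i <;> simp

theorem scan_eq_one_iff (allowDot : Bool) :
    ∀ (s : List Char) (dot : Int), scanChars allowDot dot s = 1 ↔
      ((∀ c ∈ s, PySem.Chars.isdigit c = true ∨ (allowDot = true ∧ c = '.')) ∧
        s.count '.' + (if dot = 0 then 0 else 1) ≤ 1) := by
  intro s
  induction s with
  | nil =>
    intro dot
    simp only [scanChars, List.not_mem_nil, false_implies, implies_true, true_and,
      List.count_nil, zero_add]
    constructor
    · intro _; split_ifs <;> omega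
    · intro _; trivial
  | cons c rest ih =>
    intro dot
    simp only [scanChars]
    by_cases h1 : (c == '.' && allowDot) = true
    · simp only [Bool.and_eq_true, beq_iff_eq] at h1
      obtain ⟨hc, hd⟩ := h1
      subst hc; subst hd
      rw [if_pos (by decide : (('.' : Char) == '.' && true) = true)]
      by_cases h2 : dot = 0
      · subst h2
        rw [if_pos (by decide : (((0 : Int) == 0) = true)), ih 1,
          if_neg (by decide : ¬ (1 : Int) = 0), if_pos (rfl : (0 : Int) = 0),
          List.count_cons_self]
        constructor
        · rintro ⟨ha, hb⟩
          refine ⟨?_, by omega⟩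
          intro x hx
          rcases List.mem_cons.mp hx with rfl | hx
          · exact Or.inr ⟨rfl, rfl⟩
          · exact ha x hx
        · rintro ⟨ha, hb⟩
          exact ⟨fun x hx => ha x (List.mem_cons_of_mem _ hx), by omega⟩
      · rw [if_neg (by simpa using h2)]
        constructor
        · intro h; exact absurd h (by decide)
        · rintro ⟨-, hb⟩
          rw [if_neg h2, List.count_cons_self] at hb
          omega
    · have h1' : ¬ (c = '.' ∧ allowDot = true) := by
        intro ⟨hc, hd⟩; subst hc; simp [hd] at h1
      rw [if_neg h1]
      by_cases h3 : PySem.Chars.isdigit c = true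
      · have hcdot : c ≠ '.' := fun hc => by subst hc; exact absurd h3 (by decide)
        have hcnt : List.count '.' (c :: rest) = List.count '.' rest := by
          rw [List.count_cons]
          simp [hcdot]
        rw [if_neg (by simp [h3]), ih dot, hcnt]
        constructor
        · rintro ⟨ha, hb⟩
          refine ⟨?_, by omega⟩
          intro x hx
          rcases List.mem_cons.mp hx with rfl | hx
          · exact Or.inl h3
          · exact ha x hx
        · rintro ⟨ha, hb⟩
          exact ⟨fun x hx => ha x (List.mem_cons_of_mem _ hx), by omega⟩
      · rw [if_pos (by simp [h3])]
        constructor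
        · intro h; exact absurd h (by decide)
        · rintro ⟨ha, -⟩
          rcases ha c (List.mem_cons_self) with h | ⟨hd, hc⟩
          · exact absurd h h3
          · exact absurd ⟨hc, hd⟩ h1'

theorem scan_zero_or_one (allowDot : Bool) :
    ∀ (s : List Char) (dot : Int), scanChars allowDot dot s = 0 ∨ scanChars allowDot dot s = 1 := by
  intro s
  induction s with
  | nil => intro dot; right; rfl
  | cons c rest ih =>
    intro dot
    simp only [scanChars]
    by_cases h1 : (c == '.' && allowDot) = true
    · simp only [h1, if_pos]
      by_cases h2 : dot = 0
      · simpa [h2] using ih 1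
      · simp [h2]
    · simp only [Bool.not_eq_true] at h1
      by_cases h3 : PySem.Chars.isdigit c = true
      · simpa [h1, h3] using ih dot
      · simp [h1, h3]

theorem strIsdigit_iff (l : List Char) :
    PySem.Chars.strIsdigit l = true ↔ l ≠ [] ∧ ∀ c ∈ l, PySem.Chars.isdigit c = true := by
  unfold PySem.Chars.strIsdigit
  rw [Bool.and_eq_true, Bool.not_eq_true', List.isEmpty_eq_false_iff, List.all_eq_true]

theorem erase_digit_iff (t : List Char) (ce : Char) (hmem : ce ∈ t) (hce : ce ≠ '.') :
    PySem.Chars.strIsdigit (t.erase '.') = true ↔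
      ((∀ c ∈ t, PySem.Chars.isdigit c = true ∨ c = '.') ∧ t.count '.' ≤ 1) := by
  rw [strIsdigit_iff]
  constructor
  · rintro ⟨-, hall⟩
    constructor
    · intro c hct
      by_cases hcd : c = '.'
      · exact Or.inr hcd
      · exact Or.inl (hall c ((List.mem_erase_of_ne hcd).mpr hct))
    · by_contra h
      have h2 : 2 ≤ t.count '.' := by omega
      have : 0 < (t.erase '.').count '.' := by
        rw [List.count_erase_self]; omega
      have hdm : ('.' : Char) ∈ t.erase '.' := List.count_pos_iff.mp this
      exact absurd (hall '.' hdm) (by decide)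
  · rintro ⟨hall, hcnt⟩
    refine ⟨?_, ?_⟩
    · intro hnil
      have : ce ∈ t.erase '.' := (List.mem_erase_of_ne hce).mpr hmem
      rw [hnil] at this; exact absurd this (by simp)
    · intro c hc
      have hct : c ∈ t := List.mem_of_mem_erase hc
      rcases hall c hct with h | h
      · exact h
      · subst h
        have h1 : 0 < t.count '.' := List.count_pos_iff.mpr hct
        have : 0 < (t.erase '.').count '.' := List.count_pos_iff.mpr hc
        rw [List.count_erase_self] at this
        omega

theorem scan_eq_validate (allowDot : Bool) (s : List Char) (ce : Char) (hce : ce ≠ '.') :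
    scanChars allowDot 0 (s ++ [ce]) =
      (if PySem.Chars.strIsdigit (if allowDot then (s ++ [ce]).erase '.' else s ++ [ce]) then 1 else 0) := by
  set t := s ++ [ce] with ht
  have hmem : ce ∈ t := by simp [ht]
  have hkey : scanChars allowDot 0 t = 1 ↔
      PySem.Chars.strIsdigit (if allowDot then t.erase '.' else t) = true := by
    rw [scan_eq_one_iff, if_pos (rfl : (0 : Int) = 0)]
    cases allowDot with
    | true =>
      rw [if_pos rfl, erase_digit_iff t ce hmem hce]
      constructor
      · rintro ⟨ha, hb⟩
        refine ⟨fun c hc => (ha c hc).imp id And.right, by omega⟩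
      · rintro ⟨ha, hb⟩
        exact ⟨fun c hc => (ha c hc).imp id (fun h => ⟨rfl, h⟩), by omega⟩
    | false =>
      rw [if_neg (by simp), strIsdigit_iff]
      constructor
      · rintro ⟨ha, -⟩
        refine ⟨by simp [ht], fun c hc => ?_⟩
        rcases ha c hc with h | ⟨h, -⟩
        · exact h
        · exact absurd h (by decide)
      · rintro ⟨-, ha⟩
        refine ⟨fun c hc => Or.inl (ha c hc), ?_⟩
        have : t.count '.' = 0 := by
          rw [List.count_eq_zero]
          intro hd
          exact absurd (ha '.' hd) (by decide)
        omega
  rcases scan_zero_or_one allowDot t 0 with h | h <;>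
    by_cases h' : PySem.Chars.strIsdigit (if allowDot then t.erase '.' else t) = true <;>
      simp_all

theorem main_loop (A : String) (allowDot : Bool) (a e : Int) (ce : Char)
    (hle : a ≤ e) (he : PySem.Str.pyGet? A e = some ce) (hce : ce ≠ '.') :
    isNumLoop A allowDot (PySem.List.pyRange a (e + 1) 1) 0 =
      (match gatherChars A (PySem.List.pyRange a (e + 1) 1) with
        | none => 0
        | some s => if PySem.Chars.strIsdigit (if allowDot then s.erase '.' else s) then 1 else 0) := by
  have hsplit : PySem.List.pyRange a (e + 1) 1 = PySem.List.pyRange a e 1 ++ [e] :=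
    PySem.List.pyRange_one_succ_right hle
  rw [hsplit]
  cases hg : gatherChars A (PySem.List.pyRange a e 1) with
  | none =>
    have : gatherChars A (PySem.List.pyRange a e 1 ++ [e]) = none := by
      rw [gather_append, hg]; rfl
    rw [this, loop_none A allowDot _ _ this]
  | some cs =>
    have hg2 : gatherChars A (PySem.List.pyRange a e 1 ++ [e]) = some (cs ++ [ce]) := by
      rw [gather_append, hg, he]; rfl
    rw [hg2, loop_some A allowDot _ _ _ hg2]
    exact scan_eq_validate allowDot cs ce hce

theorem ports_eq (A : String) (start end_ : Int) (allowDot : Bool) :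
    isNumberHelper A start end_ allowDot = isNumberHelper_alt A start end_ allowDot := by
  unfold isNumberHelper isNumberHelper_alt
  cases h0 : PySem.Str.pyGet? A start with
  | none => rfl
  | some c0 =>
    cases he : PySem.Str.pyGet? A end_ with
    | none => rfl
    | some ce =>
      simp only
      by_cases hsign : ((decide (start ≤ end_) && (c0 == '+')) || (c0 == '-')) = true
      · simp only [hsign, if_pos]
        by_cases hdot : (ce == '.') = true
        · simp [hdot]
        · simp only [hdot, Bool.false_eq_true, if_false, Bool.false_or]
          by_cases hgt : start + 1 > end_
          · simp [hgt]
          · have hle : start + 1 ≤ end_ := by omega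
            simp only [decide_eq_true_eq, hgt, if_false]
            exact main_loop A allowDot (start + 1) end_ ce hle he (by simpa using hdot)
      · simp only [Bool.not_eq_true] at hsign
        simp only [hsign, Bool.false_eq_true, if_false]
        by_cases hdot : (ce == '.') = true
        · simp [hdot]
        · simp only [hdot, Bool.false_eq_true, if_false, Bool.false_or, Int.add_zero]
          by_cases hgt : start > end_
          · simp [hgt]
          · have hle : start ≤ end_ := by omega
            simp only [decide_eq_false hgt, Bool.false_eq_true, if_false]
            exact main_loop A allowDot start end_ ce hle he (by simpa using hdot)

-- ===== VERDICT (by name: the statement is the Claim_ definition above) =====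
theorem isNumberHelper_spec : Claim_equal_isNumberHelper := by
  intro A start end_ allowDot _ _
  unfold Spec_isNumberHelper
  exact ports_eq A start end_ allowDot
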